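-- pv_equiv track=rewrite | github.com/valeria-edulabs/intel-basic-python-nov-24 | meeting2/solutions/categorize_numbers.py | categorize_numbers
-- ===== SOURCE A (Python) =====
-- def categorize_numbers(numbers):
--     # Initialize the dictionary with empty lists for each category
--     categories = {
--         "positive": [],
--         "negative": [],
--         "zero": []
--     }
--
--     # Iterate over each number in the input list
--     for number in numbers:
--         # Use if/elif/else to categorize the number
--         if number > 0:
--             categories["positive"].append(number)
--         elif number < 0:
--             categories["negative"].append(number)
--         else:
--             categories["zero"].append(number)
--
--     return categories
-- ===== SOURCE B (Python) =====
-- def categorize_numbers(numbers):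
--     nums = list(numbers)
--     return {
--         "positive": [n for n in nums if n > 0],
--         "negative": [n for n in nums if n < 0],
--         "zero": [n for n in nums if not (n > 0) and not (n < 0)],
--     }
-- ===== Notes on version B (the rewrite author's own statement) =====
-- stated objective: idiomatic
-- what changed: Replaces the single loop that appends into a mutable dict of three lists by three independent filtering comprehensions, one per category, with the zero bucket as the complement of the other two predicates.
import Mathlib
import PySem

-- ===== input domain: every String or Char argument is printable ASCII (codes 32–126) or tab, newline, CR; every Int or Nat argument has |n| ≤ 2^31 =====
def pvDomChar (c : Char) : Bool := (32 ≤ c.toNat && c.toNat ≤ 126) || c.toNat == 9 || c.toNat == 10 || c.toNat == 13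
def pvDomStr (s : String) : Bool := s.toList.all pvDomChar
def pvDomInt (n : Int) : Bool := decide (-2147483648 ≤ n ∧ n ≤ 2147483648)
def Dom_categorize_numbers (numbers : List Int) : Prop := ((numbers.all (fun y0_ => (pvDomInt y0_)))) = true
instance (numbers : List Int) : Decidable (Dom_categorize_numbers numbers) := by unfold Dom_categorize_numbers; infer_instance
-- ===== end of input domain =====

-- B replaces A's single loop appending into a mutable dict by three independent
-- filtering comprehensions, one per category (objective: idiomatic; same cost).

-- ===== PORT A =====
-- A: initialize dict of three empty lists, loop appending each number into its bucket.
def categorize_numbers (numbers : List Int) : List (String × List Int) :=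
  let categories : PySem.Dict String (List Int) :=
    PySem.Dict.ofList [("positive", []), ("negative", []), ("zero", [])]
  let final := numbers.foldl (fun d number =>
    if number > 0 then d.modify "positive" [] (· ++ [number])
    else if number < 0 then d.modify "negative" [] (· ++ [number])
    else d.modify "zero" [] (· ++ [number])) categories
  final.items

-- ===== PORT B =====
-- B: three comprehensions, each a scan of the list.
def categorize_numbers_alt (numbers : List Int) : List (String × List Int) :=
  [("positive", numbers.filter (fun n => decide (n > 0))),
   ("negative", numbers.filter (fun n => decide (n < 0))),
   ("zero", numbers.filter (fun n => !decide (n > 0) && !decide (n < 0)))]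

-- ===== PRECONDITION & SPEC =====
def Spec_categorize_numbers (numbers : List Int) (out : List (String × List Int)) : Prop := out = categorize_numbers_alt numbers
instance (numbers : List Int) (out : List (String × List Int)) : Decidable (Spec_categorize_numbers numbers out) := by unfold Spec_categorize_numbers; infer_instance

-- ===== CLAIM (what is proved, stated in full; the proofs are below) =====
def Claim_equal_categorize_numbers : Prop := ∀ (numbers : List Int), Dom_categorize_numbers numbers → Spec_categorize_numbers numbers (categorize_numbers numbers)

-- ===== LEMMAS AND PROOFS =====

-- Loop invariant: starting from the three-key literal dict with buckets p, q, z,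
-- A's fold ends with each bucket extended by the corresponding filter of the remaining list.
theorem categorize_loop (ns : List Int) (p q z : List Int) :
    (ns.foldl (fun d number =>
      if number > 0 then d.modify "positive" [] (· ++ [number])
      else if number < 0 then d.modify "negative" [] (· ++ [number])
      else d.modify "zero" [] (· ++ [number]))
      (PySem.Dict.mk [("positive", p), ("negative", q), ("zero", z)])) =
    PySem.Dict.mk [("positive", p ++ ns.filter (fun n => decide (n > 0))),
                   ("negative", q ++ ns.filter (fun n => decide (n < 0))),
                   ("zero", z ++ ns.filter (fun n => !decide (n > 0) && !decide (n < 0)))] := by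
  induction ns generalizing p q z with
  | nil => simp [List.foldl]
  | cons x xs ih =>
    simp only [List.foldl_cons]
    rcases lt_trichotomy x 0 with hx | hx | hx
    · rw [if_neg (by omega), if_pos hx]
      show (xs.foldl _ ((PySem.Dict.mk [("positive", p), ("negative", q), ("zero", z)]).modify "negative" [] (· ++ [x]))) = _
      have : (PySem.Dict.mk [("positive", p), ("negative", q), ("zero", z)]).modify "negative" [] (· ++ [x]) =
          PySem.Dict.mk [("positive", p), ("negative", q ++ [x]), ("zero", z)] := by
        simp [PySem.Dict.modify, PySem.Dict.get?, PySem.Dict.contains, PySem.Dict.insert,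
          PySem.Dict.getD]
      rw [this, ih]
      simp [hx, not_lt.mpr (le_of_lt hx)]
    · subst hx
      rw [if_neg (by omega), if_neg (by omega)]
      have : (PySem.Dict.mk [("positive", p), ("negative", q), ("zero", z)]).modify "zero" [] (· ++ [(0 : Int)]) =
          PySem.Dict.mk [("positive", p), ("negative", q), ("zero", z ++ [(0 : Int)])] := by
        simp [PySem.Dict.modify, PySem.Dict.get?, PySem.Dict.contains, PySem.Dict.insert,
          PySem.Dict.getD]
      rw [this, ih]
      simp
    · rw [if_pos hx]
      have : (PySem.Dict.mk [("positive", p), ("negative", q), ("zero", z)]).modify "positive" [] (· ++ [x]) =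
          PySem.Dict.mk [("positive", p ++ [x]), ("negative", q), ("zero", z)] := by
        simp [PySem.Dict.modify, PySem.Dict.get?, PySem.Dict.contains, PySem.Dict.insert,
          PySem.Dict.getD]
      rw [this, ih]
      simp [hx, not_lt.mpr (le_of_lt hx)]

-- ===== VERDICT (by name: the statement is the Claim_ definition above) =====
theorem categorize_numbers_spec : Claim_equal_categorize_numbers := by
  intro numbers _
  show categorize_numbers numbers = categorize_numbers_alt numbers
  unfold categorize_numbers categorize_numbers_alt
  have h0 : PySem.Dict.ofList [("positive", ([] : List Int)), ("negative", []), ("zero", [])] =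
      PySem.Dict.mk [("positive", []), ("negative", []), ("zero", [])] := by decide
  simp only [h0, categorize_loop]
  simp
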